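-- pv_equiv track=rewrite | github.com/Max-Highsmith/lsdcm | tad_metrics.py | getTadBorderDists
-- ===== SOURCE A (Python) =====
-- def getTadBorderDists(x,y):
--     nearest_distances = []
--     for border1 in x:
--         if border1 >50 and border1 <101:
--             nearest = 9999
--             for border2 in y:
--                 dist = abs(border1-border2)
--                 if dist < nearest:
--                     nearest = dist
--             nearest_distances.append(nearest)
--
--     return nearest_distances
-- ===== SOURCE B (Python) =====
-- def getTadBorderDists(x, y):
--     # sort y once, then binary-search the insertion point of each kept border:
--     # the nearest y-border is one of the two neighbours of that point.
--     ys = sorted(y)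
--     n = len(ys)
--     out = []
--     for b in x:
--         if 50 < b < 101:
--             lo, hi = 0, n
--             while lo < hi:
--                 mid = (lo + hi) // 2
--                 if ys[mid] < b:
--                     lo = mid + 1
--                 else:
--                     hi = mid
--             best = 9999
--             if lo > 0:
--                 best = min(best, b - ys[lo - 1])
--             if lo < n:
--                 best = min(best, ys[lo] - b)
--             out.append(best)
--     return out
-- ===== Notes on version B (the rewrite author's own statement) =====
-- stated objective: alternative
-- what changed: B sorts y once and binary-searches each filtered x-border's insertion point, taking the nearer of the two neighbouring y-borders, instead of A's full inner scan of y per x-border.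
import Mathlib
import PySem

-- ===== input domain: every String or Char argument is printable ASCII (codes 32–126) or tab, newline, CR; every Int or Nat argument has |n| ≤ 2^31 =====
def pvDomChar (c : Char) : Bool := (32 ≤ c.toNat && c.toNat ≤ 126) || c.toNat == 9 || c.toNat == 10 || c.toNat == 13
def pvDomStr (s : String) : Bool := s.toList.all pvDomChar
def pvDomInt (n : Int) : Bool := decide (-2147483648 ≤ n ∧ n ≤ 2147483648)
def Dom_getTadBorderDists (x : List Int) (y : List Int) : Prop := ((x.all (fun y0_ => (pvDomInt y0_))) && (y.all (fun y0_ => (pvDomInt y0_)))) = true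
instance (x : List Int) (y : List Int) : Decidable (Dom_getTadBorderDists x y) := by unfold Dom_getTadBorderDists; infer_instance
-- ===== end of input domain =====

-- B sorts y once and binary-searches each filtered x-border's insertion point instead of scanning all of y per border.


-- ===== PORT A =====
def getTadBorderDists (x : List Int) (y : List Int) : List Int :=
  x.foldl (fun nearest_distances border1 =>
    if border1 > 50 ∧ border1 < 101 then
      nearest_distances ++
        [y.foldl (fun nearest border2 =>
            let dist := |border1 - border2|
            if dist < nearest then dist else nearest) 9999]
    else nearest_distances) []

-- ===== PORT B =====
-- hand-written bisect_left of Source B (the 'while lo < hi' loop, mid = (lo+hi)//2 inlined);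
-- ys[mid] is always in range when lo < hi ≤ ys.length, so getD is exact there
-- fuel = hi - lo bounds the number of iterations of the while loop (a totality guard only)
def pvBisect (ys : List Int) (b : Int) : Nat → Nat → Nat → Nat
  | 0, lo, _ => lo
  | fuel + 1, lo, hi =>
    if lo < hi then
      if ys.getD ((lo + hi) / 2) 0 < b then pvBisect ys b fuel ((lo + hi) / 2 + 1) hi
      else pvBisect ys b fuel lo ((lo + hi) / 2)
    else lo

def pvNearest (ys : List Int) (n : Nat) (b : Int) : Int :=
  let lo := pvBisect ys b n 0 n
  let best : Int := 9999
  let best := if 0 < lo then min best (b - ys.getD (lo - 1) 0) else best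
  if lo < n then min best (ys.getD lo 0 - b) else best

def getTadBorderDists_alt (x : List Int) (y : List Int) : List Int :=
  let ys := PySem.List.sorted y (fun v => v) false
  let n := ys.length
  x.foldl (fun out b =>
    if b > 50 ∧ b < 101 then out ++ [pvNearest ys n b] else out) []

-- ===== PRECONDITION & SPEC =====
def Spec_getTadBorderDists (x : List Int) (y : List Int) (out : List Int) : Prop := out = getTadBorderDists_alt x y
instance (x : List Int) (y : List Int) (out : List Int) : Decidable (Spec_getTadBorderDists x y out) := by unfold Spec_getTadBorderDists; infer_instance

-- ===== CLAIM (what is proved, stated in full; the proofs are below) =====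
def Claim_equal_getTadBorderDists : Prop := ∀ (x : List Int) (y : List Int), Dom_getTadBorderDists x y → Spec_getTadBorderDists x y (getTadBorderDists x y)

-- ===== LEMMAS AND PROOFS =====

-- proof-only view of pvNearest's result for a given insertion point lo
def pvNearVal (ys : List Int) (b : Int) (lo : Nat) : Int :=
  if lo < ys.length then
    min (if 0 < lo then min 9999 (b - ys.getD (lo - 1) 0) else 9999) (ys.getD lo 0 - b)
  else (if 0 < lo then min 9999 (b - ys.getD (lo - 1) 0) else 9999)

theorem pvNearest_eq_val (ys : List Int) (b : Int) :
    pvNearest ys ys.length b = pvNearVal ys b (pvBisect ys b ys.length 0 ys.length) := rfl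

-- A's strict-less update is just min
theorem pvInnerA_eq_foldmin (b : Int) (L : List Int) :
    L.foldl (fun nearest z => let dist := |b - z|; if dist < nearest then dist else nearest) 9999
      = L.foldl (fun nearest z => min nearest (|b - z|)) 9999 := by
  have h : (fun (nearest z : Int) => let dist := |b - z|; if dist < nearest then dist else nearest)
       = (fun nearest z => min nearest (|b - z|)) := by
    funext n z
    simp only [min_def]
    split_ifs <;> omega
  rw [h]

-- the fold-min is a lower bound of its start and of every |b - z|
theorem pvFoldmin_le (b : Int) (L : List Int) (init : Int) :
    L.foldl (fun n z => min n (|b - z|)) init ≤ init ∧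
      ∀ z ∈ L, L.foldl (fun n z => min n (|b - z|)) init ≤ |b - z| := by
  induction L generalizing init with
  | nil => simp
  | cons a t ih =>
    obtain ⟨h1, h2⟩ := ih (min init (|b - a|))
    refine ⟨le_trans h1 (min_le_left _ _), ?_⟩
    intro z hz
    rcases List.mem_cons.mp hz with rfl | hz
    · exact le_trans h1 (min_le_right _ _)
    · exact h2 z hz

-- the fold-min is attained: it is the start or one of the distances
theorem pvFoldmin_mem (b : Int) (L : List Int) (init : Int) :
    L.foldl (fun n z => min n (|b - z|)) init = init ∨
      ∃ z ∈ L, L.foldl (fun n z => min n (|b - z|)) init = |b - z| := by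
  induction L generalizing init with
  | nil => simp
  | cons a t ih =>
    rcases ih (min init (|b - a|)) with h | ⟨z, hz, h⟩
    · rw [List.foldl_cons, h]
      rcases min_cases init (|b - a|) with ⟨h', _⟩ | ⟨h', _⟩
      · exact Or.inl h'
      · exact Or.inr ⟨a, List.mem_cons_self, h'⟩
    · exact Or.inr ⟨z, List.mem_cons_of_mem _ hz, h⟩

-- bisect stays within [lo, hi]
theorem pvBisect_bounds (ys : List Int) (b : Int) :
    ∀ (k lo hi : Nat), hi - lo ≤ k → lo ≤ hi →
      lo ≤ pvBisect ys b k lo hi ∧ pvBisect ys b k lo hi ≤ hi := by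
  intro k
  induction k with
  | zero =>
    intro lo hi hk hle
    have h : lo = hi := by omega
    subst h
    simp [pvBisect]
  | succ k ih =>
    intro lo hi hk hle
    rw [pvBisect]
    split_ifs with h1 h2
    · have h := ih ((lo + hi) / 2 + 1) hi (by omega) (by omega)
      exact ⟨by omega, h.2⟩
    · have h := ih lo ((lo + hi) / 2) (by omega) (by omega)
      exact ⟨h.1, by omega⟩
    · exact ⟨le_refl _, hle⟩

-- everything left of the returned point is < b, everything right of it is ≥ b
theorem pvBisect_spec (ys : List Int) (b : Int)
    (hs : List.Pairwise (· ≤ ·) ys) :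
    ∀ (k lo hi : Nat), hi - lo ≤ k → lo ≤ hi → hi ≤ ys.length →
      (∀ j, lo ≤ j → j < pvBisect ys b k lo hi → ys.getD j 0 < b) ∧
      (∀ j, pvBisect ys b k lo hi ≤ j → j < hi → b ≤ ys.getD j 0) := by
  have mono : ∀ p q, p ≤ q → q < ys.length → ys.getD p 0 ≤ ys.getD q 0 := by
    intro p q hpq hq
    rcases Nat.eq_or_lt_of_le hpq with rfl | hlt
    · exact le_refl _
    · rw [List.getD_eq_getElem ys 0 (by omega), List.getD_eq_getElem ys 0 hq]
      exact List.pairwise_iff_getElem.mp hs p q (by omega) hq hlt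
  intro k
  induction k with
  | zero =>
    intro lo hi hk hle hlen
    have h : lo = hi := by omega
    subst h
    simp only [pvBisect]
    exact ⟨fun j h1 h2 => absurd h2 (by omega), fun j h1 h2 => absurd h2 (by omega)⟩
  | succ k ih =>
    intro lo hi hk hle hlen
    rw [pvBisect]
    split_ifs with h1 h2
    · -- ys[mid] < b, recurse on (mid+1, hi)
      obtain ⟨ih1, ih2⟩ := ih ((lo + hi) / 2 + 1) hi (by omega) (by omega) hlen
      have hb := pvBisect_bounds ys b k ((lo + hi) / 2 + 1) hi (by omega) (by omega)
      refine ⟨?_, ih2⟩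
      intro j hj1 hj2
      by_cases hj : (lo + hi) / 2 + 1 ≤ j
      · exact ih1 j hj hj2
      · exact lt_of_le_of_lt (mono j ((lo + hi) / 2) (by omega) (by omega)) h2
    · -- b ≤ ys[mid], recurse on (lo, mid)
      obtain ⟨ih1, ih2⟩ := ih lo ((lo + hi) / 2) (by omega) (by omega) (by omega)
      have hb := pvBisect_bounds ys b k lo ((lo + hi) / 2) (by omega) (by omega)
      refine ⟨ih1, ?_⟩
      intro j hj1 hj2
      by_cases hj : j < (lo + hi) / 2
      · exact ih2 j hj1 hj
      · exact le_trans (not_lt.mp h2) (mono ((lo + hi) / 2) j (by omega) (by omega))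
    · exact ⟨fun j hj1 hj2 => absurd hj2 (by omega), fun j hj1 hj2 => absurd hj2 (by omega)⟩

-- at a correct insertion point, the two-neighbour value is the fold-min of all distances
theorem pvNearVal_eq (ys : List Int) (b : Int) (lo : Nat)
    (hs : List.Pairwise (· ≤ ·) ys)
    (hlon : lo ≤ ys.length)
    (hlt : ∀ j, j < lo → ys.getD j 0 < b)
    (hge : ∀ j, lo ≤ j → j < ys.length → b ≤ ys.getD j 0) :
    pvNearVal ys b lo = ys.foldl (fun n z => min n (|b - z|)) 9999 := by
  have mono : ∀ p q, p ≤ q → q < ys.length → ys.getD p 0 ≤ ys.getD q 0 := by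
    intro p q hpq hq
    rcases Nat.eq_or_lt_of_le hpq with rfl | hlt'
    · exact le_refl _
    · rw [List.getD_eq_getElem ys 0 (by omega), List.getD_eq_getElem ys 0 hq]
      exact List.pairwise_iff_getElem.mp hs p q (by omega) hq hlt'
  have habs_lt : ∀ j, j < lo → |b - ys.getD j 0| = b - ys.getD j 0 := by
    intro j hj
    have h := hlt j hj
    rw [abs_of_pos (by omega)]
  have habs_ge : ∀ j, lo ≤ j → j < ys.length → |b - ys.getD j 0| = ys.getD j 0 - b := by
    intro j hj1 hj2
    have h := hge j hj1 hj2
    rw [abs_of_nonpos (by omega), neg_sub]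
  have hmemD : ∀ j, j < ys.length → ys.getD j 0 ∈ ys := by
    intro j hj
    rw [List.getD_eq_getElem ys 0 hj]
    exact List.getElem_mem _
  obtain ⟨hFinit, hFle⟩ := pvFoldmin_le b ys 9999
  have hFmem := pvFoldmin_mem b ys 9999
  -- pvNearVal is at most 9999
  have hub9 : pvNearVal ys b lo ≤ 9999 := by
    unfold pvNearVal
    split_ifs <;> simp
  -- pvNearVal is at most every distance
  have hub : ∀ z ∈ ys, pvNearVal ys b lo ≤ |b - z| := by
    intro z hz
    obtain ⟨j, hj, hjz⟩ := List.mem_iff_getElem.mp hz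
    have hjd : ys.getD j 0 = z := by rw [List.getD_eq_getElem ys 0 hj, hjz]
    unfold pvNearVal
    by_cases hcase : j < lo
    · have h0 : 0 < lo := by omega
      have hmono : ys.getD j 0 ≤ ys.getD (lo - 1) 0 := mono j (lo - 1) (by omega) (by omega)
      have hdz : |b - z| = b - ys.getD j 0 := by rw [← hjd]; exact habs_lt j hcase
      have hd1 : ys.getD (lo - 1) 0 < b := hlt (lo - 1) (by omega)
      have key : min 9999 (b - ys.getD (lo - 1) 0) ≤ b - ys.getD j 0 :=
        le_trans (min_le_right _ _) (by omega)
      rw [hdz]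
      simp only [if_pos h0]
      split_ifs with h1
      · exact le_trans (min_le_left _ _) key
      · exact key
    · have hjlo : lo ≤ j := by omega
      have hlon' : lo < ys.length := by omega
      have hmono : ys.getD lo 0 ≤ ys.getD j 0 := mono lo j hjlo hj
      have hdz : |b - z| = ys.getD j 0 - b := by rw [← hjd]; exact habs_ge j hjlo hj
      rw [hdz]
      simp only [if_pos hlon']
      exact le_trans (min_le_right _ _) (by omega)
  -- pvNearVal is attained: it is 9999 or one of the distances
  have hmem : pvNearVal ys b lo = 9999 ∨ ∃ z ∈ ys, pvNearVal ys b lo = |b - z| := by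
    unfold pvNearVal
    have e1 : 0 < lo → b - ys.getD (lo - 1) 0 = |b - ys.getD (lo - 1) 0| :=
      fun h0 => (habs_lt (lo - 1) (by omega)).symm
    have e2 : lo < ys.length → ys.getD lo 0 - b = |b - ys.getD lo 0| :=
      fun hl => (habs_ge lo (le_refl _) hl).symm
    split_ifs with h1 h2 h3
    · rcases min_cases (min 9999 (b - ys.getD (lo - 1) 0)) (ys.getD lo 0 - b) with ⟨h, _⟩ | ⟨h, _⟩
      · rw [h]
        rcases min_cases (9999 : Int) (b - ys.getD (lo - 1) 0) with ⟨h', _⟩ | ⟨h', _⟩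
        · exact Or.inl h'
        · exact Or.inr ⟨ys.getD (lo - 1) 0, hmemD _ (by omega), by rw [h']; exact e1 h2⟩
      · exact Or.inr ⟨ys.getD lo 0, hmemD _ h1, by rw [h]; exact e2 h1⟩
    · rcases min_cases (9999 : Int) (ys.getD lo 0 - b) with ⟨h, _⟩ | ⟨h, _⟩
      · exact Or.inl h
      · exact Or.inr ⟨ys.getD lo 0, hmemD _ h1, by rw [h]; exact e2 h1⟩
    · rcases min_cases (9999 : Int) (b - ys.getD (lo - 1) 0) with ⟨h, _⟩ | ⟨h, _⟩
      · exact Or.inl h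
      · exact Or.inr ⟨ys.getD (lo - 1) 0, hmemD _ (by omega), by rw [h]; exact e1 h3⟩
    · exact Or.inl rfl
  apply le_antisymm
  · rcases hFmem with h | ⟨z, hz, h⟩
    · rw [h]; exact hub9
    · rw [h]; exact hub z hz
  · rcases hmem with h | ⟨z, hz, h⟩
    · rw [h]; exact hFinit
    · rw [h]; exact hFle z hz

-- A's inner loop over y equals pvNearest over sorted y
theorem pvInner_eq (b : Int) (y : List Int) :
    y.foldl (fun nearest z => let dist := |b - z|; if dist < nearest then dist else nearest) 9999
      = pvNearest (PySem.List.sorted y (fun v => v) false)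
          (PySem.List.sorted y (fun v => v) false).length b := by
  rw [pvInnerA_eq_foldmin]
  set ys := PySem.List.sorted y (fun v => v) false with hys
  have hperm : ys.Perm y := PySem.List.sorted_perm y (fun v => v) false
  have hs : List.Pairwise (· ≤ ·) ys := PySem.List.sorted_pairwise y (fun v => v)
  obtain ⟨hlo0, hlon⟩ := pvBisect_bounds ys b ys.length 0 ys.length (by omega) (by omega)
  obtain ⟨hlt, hge⟩ := pvBisect_spec ys b hs ys.length 0 ys.length (by omega) (by omega) (le_refl _)
  rw [pvNearest_eq_val,
      pvNearVal_eq ys b (pvBisect ys b ys.length 0 ys.length) hs hlon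
        (fun j hj => hlt j (Nat.zero_le j) hj) hge]
  exact List.Perm.foldl_eq
    (f := fun n z => min n (|b - z|))
    (rcomm := ⟨fun a u v => min_right_comm a (|b - u|) (|b - v|)⟩) hperm.symm 9999

-- ===== VERDICT (by name: the statement is the Claim_ definition above) =====
theorem getTadBorderDists_spec : Claim_equal_getTadBorderDists := by
  intro x y _
  unfold Spec_getTadBorderDists
  simp only [getTadBorderDists, getTadBorderDists_alt]
  have hfun : (fun (nearest_distances : List Int) (border1 : Int) =>
      if border1 > 50 ∧ border1 < 101 then
        nearest_distances ++
          [y.foldl (fun nearest border2 =>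
              let dist := |border1 - border2|
              if dist < nearest then dist else nearest) 9999]
      else nearest_distances)
    = (fun (out : List Int) (b : Int) =>
      if b > 50 ∧ b < 101 then
        out ++ [pvNearest (PySem.List.sorted y (fun v => v) false)
                  (PySem.List.sorted y (fun v => v) false).length b]
      else out) := by
    funext out b
    rw [pvInner_eq b y]
  rw [hfun]
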